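-- pv_equiv track=rewrite | github.com/TousakaNagio/EECP_onlinejudge | SumTo1_2.py | solution
-- ===== SOURCE A (Python) =====
-- import math
--
-- def solution(X, Y):
--     n = len(X)
--     count = 0
--     tot = {}
--     for i in range(n):
--         g = math.gcd(X[i], Y[i])
--         X[i] = X[i] // g
--         Y[i] = Y[i] // g
--     for i in range(n):
--         temp = (X[i], Y[i])
--         complement = (Y[i] - X[i], Y[i])
--         if complement in tot:
--             count += tot[complement]
--         if temp not in tot:
--             tot[temp] = 1
--         else:
--             tot[temp] += 1
--     return count % 1000000007
-- ===== SOURCE B (Python) =====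
-- import math
--
-- def solution(X, Y):
--     # Same in-place reduction of X and Y as the original (observable mutation preserved).
--     fracs = []
--     for i, (x, y) in enumerate(zip(X, Y)):
--         g = math.gcd(x, y)
--         X[i] = x // g
--         Y[i] = y // g
--         fracs.append((X[i], Y[i]))
--     # Multiplicity of every reduced fraction, built once.
--     cnt = {}
--     for f in fracs:
--         cnt[f] = cnt.get(f, 0) + 1
--     # Count ordered complement matches globally (including the self-match of
--     # self-complementary fractions), then remove the diagonal and halve.
--     matches = sum(cnt.get((b - a, b), 0) for (a, b) in fracs)
--     selfc = sum(1 for (a, b) in fracs if (b - a, b) == (a, b))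
--     return ((matches - selfc) // 2) % 1000000007
-- ===== Notes on version B (the rewrite author's own statement) =====
-- stated objective: alternative
-- what changed: Replaces A's interleaved lookup-then-update dictionary pass (counting each fraction against earlier complements) with a counter of all reduced fractions built once, followed by a global symmetric complement-match count from which the diagonal self-matches are subtracted and the rest halved; the in-place gcd reduction of X and Y is preserved.
import Mathlib
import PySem

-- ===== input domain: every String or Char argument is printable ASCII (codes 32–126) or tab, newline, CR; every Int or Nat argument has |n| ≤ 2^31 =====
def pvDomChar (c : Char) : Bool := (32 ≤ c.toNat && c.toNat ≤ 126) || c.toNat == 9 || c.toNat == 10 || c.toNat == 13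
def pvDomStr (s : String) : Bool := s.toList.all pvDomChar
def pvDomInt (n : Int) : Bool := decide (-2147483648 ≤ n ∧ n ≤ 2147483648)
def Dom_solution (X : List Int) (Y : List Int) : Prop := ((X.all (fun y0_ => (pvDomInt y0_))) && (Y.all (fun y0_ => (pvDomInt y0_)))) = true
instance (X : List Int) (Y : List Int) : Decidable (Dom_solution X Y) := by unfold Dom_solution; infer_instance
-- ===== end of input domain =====

-- B replaces A's interleaved lookup-then-update dictionary pass by a counter of all
-- reduced fractions built once, then a global symmetric complement-match count minus the
-- diagonal self-matches, halved: a different decomposition with the same return value.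
-- Both A and B mutate X and Y in place identically (gcd reduction); the equivalence
-- proved is about the return value.


-- ===== PORT A =====
-- first loop: X[i], Y[i] reduced in place by their gcd
def redStep (s : List Int × List Int) (i : Int) : List Int × List Int :=
  let x := (PySem.List.pyGet? s.1 i).getD 0
  let y := (PySem.List.pyGet? s.2 i).getD 0
  let g : Int := Int.gcd x y
  (PySem.List.pySetD s.1 i (PySem.Int.floordiv x g),
   PySem.List.pySetD s.2 i (PySem.Int.floordiv y g))

-- second loop: dict lookup of the complement, then dict update for temp
def cntStep (Xr Yr : List Int) (s : Int × PySem.Dict (Int × Int) Int) (i : Int) :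
    Int × PySem.Dict (Int × Int) Int :=
  let x := (PySem.List.pyGet? Xr i).getD 0
  let y := (PySem.List.pyGet? Yr i).getD 0
  let temp : Int × Int := (x, y)
  let complement : Int × Int := (y - x, y)
  let count := if s.2.contains complement then s.1 + s.2.getD complement 0 else s.1
  let tot :=
    match s.2.get? temp with
    | none => s.2.insert temp 1
    | some v => s.2.insert temp (v + 1)
  (count, tot)

def solution (X : List Int) (Y : List Int) : Int :=
  let n := X.length
  let XY := (PySem.List.pyRange 0 n 1).foldl redStep (X, Y)
  let s := (PySem.List.pyRange 0 n 1).foldl (cntStep XY.1 XY.2) (0, PySem.Dict.empty)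
  PySem.Int.mod s.1 1000000007

-- ===== PORT B =====
-- fracs.append((x//g, y//g)) over zip(X, Y)
def reduceFrac (p : Int × Int) : Int × Int :=
  let g : Int := Int.gcd p.1 p.2
  (PySem.Int.floordiv p.1 g, PySem.Int.floordiv p.2 g)

def solution_alt (X : List Int) (Y : List Int) : Int :=
  let fracs := (X.zip Y).map reduceFrac
  let cnt := fracs.foldl (fun d f => d.insert f (d.getD f 0 + 1))
    (PySem.Dict.empty : PySem.Dict (Int × Int) Int)
  let matchesI : Int := (fracs.map (fun q => cnt.getD (q.2 - q.1, q.2) 0)).sum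
  let selfc : Int := ((fracs.filter (fun q => ((q.2 - q.1, q.2) : Int × Int) == q)).length : Int)
  PySem.Int.mod (PySem.Int.floordiv (matchesI - selfc) 2) 1000000007

-- ===== PRECONDITION & SPEC =====
-- Pre_ excludes exactly the inputs on which A raises: len(Y) < len(X) (IndexError at Y[i])
-- and a pair X[i] = Y[i] = 0 (ZeroDivisionError, gcd = 0).
def Pre_solution (X : List Int) (Y : List Int) : Prop :=
  X.length ≤ Y.length ∧ ∀ p ∈ X.zip Y, ¬(p.1 = 0 ∧ p.2 = 0)
instance (X : List Int) (Y : List Int) : Decidable (Pre_solution X Y) := by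
  unfold Pre_solution; infer_instance
def pvWitness_solution : List Int × List Int := ([1, 2, 1], [2, 4, 2])

def Spec_solution (X : List Int) (Y : List Int) (out : Int) : Prop := out = solution_alt X Y
instance (X : List Int) (Y : List Int) (out : Int) : Decidable (Spec_solution X Y out) := by
  unfold Spec_solution; infer_instance

-- ===== CLAIM (what is proved, stated in full; the proofs are below) =====
def Claim_equal_solution : Prop := ∀ (X : List Int) (Y : List Int), Dom_solution X Y → Pre_solution X Y → Spec_solution X Y (solution X Y)

-- ===== LEMMAS AND PROOFS =====

-- A's second loop, with the dict lookups resolved, as a fold over the reduced fractions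
def step2 (s : Int × PySem.Dict (Int × Int) Int) (q : Int × Int) :
    Int × PySem.Dict (Int × Int) Int :=
  (if s.2.contains (q.2 - q.1, q.2) then s.1 + s.2.getD (q.2 - q.1, q.2) 0 else s.1,
   s.2.insert q (s.2.getD q 0 + 1))

lemma cq_eq_comm (p q : Int × Int) : (p = ((q.2 - q.1 : Int), q.2)) ↔ (q = ((p.2 - p.1 : Int), p.2)) := by
  constructor <;> (intro h; subst h; simp)

lemma red_loop (X Y : List Int) (hlen : X.length ≤ Y.length) (k : Nat) (hk : k ≤ X.length) :
    ((PySem.List.pyRange 0 k 1).foldl redStep (X, Y)).1.length = X.length ∧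
    ((PySem.List.pyRange 0 k 1).foldl redStep (X, Y)).2.length = Y.length ∧
    (∀ j : Nat,
      ((PySem.List.pyRange 0 k 1).foldl redStep (X, Y)).1[j]? =
        (if j < k then (((X.zip Y).map reduceFrac)[j]?).map Prod.fst else X[j]?) ∧
      ((PySem.List.pyRange 0 k 1).foldl redStep (X, Y)).2[j]? =
        (if j < k then (((X.zip Y).map reduceFrac)[j]?).map Prod.snd else Y[j]?)) := by
  induction k with
  | zero =>
    simp [PySem.List.pyRange_one_eq_nil (le_refl (0 : Int))]
  | succ k ih =>
    obtain ⟨h1, h2, h3⟩ := ih (by omega)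
    have hkX : k < X.length := by omega
    have hkY : k < Y.length := by omega
    have hr : PySem.List.pyRange 0 ((k + 1 : Nat) : Int) 1 =
        PySem.List.pyRange 0 (k : Nat) 1 ++ [(k : Int)] := by
      push_cast
      exact PySem.List.pyRange_one_succ_right (by exact_mod_cast Int.natCast_nonneg k)
    rw [hr, List.foldl_append]
    set s := (PySem.List.pyRange 0 (k : Nat) 1).foldl redStep (X, Y) with hs
    have hsx : s.1[k]? = some X[k] := by
      rw [(h3 k).1, if_neg (lt_irrefl k), List.getElem?_eq_getElem hkX]
    have hsy : s.2[k]? = some Y[k] := by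
      rw [(h3 k).2, if_neg (lt_irrefl k), List.getElem?_eq_getElem hkY]
    have hzip : k < (X.zip Y).length := by
      rw [List.length_zip]; omega
    have hFk : ((X.zip Y).map reduceFrac)[k]? = some (reduceFrac (X[k], Y[k])) := by
      rw [List.getElem?_map, List.getElem?_eq_getElem hzip]
      simp [List.getElem_zip]
    simp only [redStep, List.foldl_cons, List.foldl_nil,
      PySem.List.pySetD_natCast]
    refine ⟨by simpa using h1, by simpa using h2, ?_⟩
    intro j
    constructor
    · rw [List.getElem?_set]
      by_cases hjk : k = j
      · subst hjk
        rw [if_pos rfl, if_pos (by omega), if_pos (by omega), hFk]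
        simp [reduceFrac, hsx, hsy]
      · rw [if_neg hjk, (h3 j).1]
        by_cases hj : j < k
        · rw [if_pos hj, if_pos (by omega)]
        · rw [if_neg hj, if_neg (by omega)]
    · rw [List.getElem?_set]
      by_cases hjk : k = j
      · subst hjk
        rw [if_pos rfl, if_pos (by omega), if_pos (by omega), hFk]
        simp [reduceFrac, hsx, hsy]
      · rw [if_neg hjk, (h3 j).2]
        by_cases hj : j < k
        · rw [if_pos hj, if_pos (by omega)]
        · rw [if_neg hj, if_neg (by omega)]

lemma cnt_loop (Xr Yr : List Int) (F : List (Int × Int))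
    (hx : ∀ j : Nat, j < F.length → Xr[j]? = (F[j]?).map Prod.fst)
    (hy : ∀ j : Nat, j < F.length → Yr[j]? = (F[j]?).map Prod.snd)
    (k : Nat) (hk : k ≤ F.length) (s : Int × PySem.Dict (Int × Int) Int) :
    (PySem.List.pyRange 0 k 1).foldl (cntStep Xr Yr) s = (F.take k).foldl step2 s := by
  induction k with
  | zero =>
    simp [PySem.List.pyRange_one_eq_nil (le_refl (0 : Int))]
  | succ k ih =>
    have hkF : k < F.length := by omega
    have hr : PySem.List.pyRange 0 ((k + 1 : Nat) : Int) 1 =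
        PySem.List.pyRange 0 (k : Nat) 1 ++ [(k : Int)] := by
      push_cast
      exact PySem.List.pyRange_one_succ_right (by exact_mod_cast Int.natCast_nonneg k)
    have ht : F.take (k + 1) = F.take k ++ [F[k]] := by
      rw [List.take_add_one, List.getElem?_eq_getElem hkF]; rfl
    rw [hr, ht, List.foldl_append, List.foldl_append, ih (by omega)]
    set s' := (F.take k).foldl step2 s with hs'
    have hx' : (PySem.List.pyGet? Xr (k : Int)).getD 0 = F[k].1 := by
      rw [PySem.List.pyGet?_natCast, hx k hkF, List.getElem?_eq_getElem hkF]; rfl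
    have hy' : (PySem.List.pyGet? Yr (k : Int)).getD 0 = F[k].2 := by
      rw [PySem.List.pyGet?_natCast, hy k hkF, List.getElem?_eq_getElem hkF]; rfl
    simp only [List.foldl_cons, List.foldl_nil, cntStep, hx', hy']
    cases h : s'.2.get? (F[k].1, F[k].2) with
    | none =>
      rw [Prod.mk.eta] at h
      simp [step2, PySem.Dict.getD_of_get?_eq_none s'.2 0 h]
    | some v =>
      rw [Prod.mk.eta] at h
      simp [step2, PySem.Dict.getD_of_get?_eq_some s'.2 0 h]

lemma key_lemma (F : List (Int × Int)) :
    (F.foldl step2 (0, PySem.Dict.empty)).2 = PySem.Dict.counter F ∧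
    (F.map (fun q => ((F.count ((q.2 - q.1, q.2) : Int × Int) : Nat) : Int))).sum
      - ((F.filter (fun q => ((q.2 - q.1, q.2) : Int × Int) == q)).length : Int)
      = 2 * (F.foldl step2 (0, PySem.Dict.empty)).1 := by
  induction F using List.reverseRecOn with
  | nil => exact ⟨rfl, by simp⟩
  | append_singleton F q ih =>
    obtain ⟨ihd, ihs⟩ := ih
    rw [List.foldl_append]
    set P := F.foldl step2 ((0 : Int), (PySem.Dict.empty : PySem.Dict (Int × Int) Int)) with hP
    have hd2 : (step2 P q).2 = PySem.Dict.counter (F ++ [q]) := by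
      show P.2.insert q (P.2.getD q 0 + 1) = _
      rw [PySem.Dict.counter_append_singleton, ihd]
      rfl
    have hc : (step2 P q).1 = P.1 + (F.count ((q.2 - q.1, q.2) : Int × Int) : Int) := by
      show (if P.2.contains (q.2 - q.1, q.2) then P.1 + P.2.getD (q.2 - q.1, q.2) 0 else P.1) = _
      rw [ihd, PySem.Dict.contains_counter, PySem.Dict.getD_counter]
      by_cases hin : ((q.2 - q.1, q.2) : Int × Int) ∈ F
      · rw [if_pos (by simpa using hin)]
      · rw [if_neg (by simpa using hin), List.count_eq_zero.mpr hin]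
        simp
    refine ⟨hd2, ?_⟩
    simp only [List.foldl_cons, List.foldl_nil]
    rw [hc]
    -- expand the sum and the filter over F ++ [q]
    have hcount : ∀ x : Int × Int, (F ++ [q]).count x = F.count x + [q].count x :=
      fun x => List.count_append
    have hmapsum :
        ((F ++ [q]).map (fun p => (((F ++ [q]).count ((p.2 - p.1, p.2) : Int × Int) : Nat) : Int))).sum
          = (F.map (fun p => ((F.count ((p.2 - p.1, p.2) : Int × Int) : Nat) : Int))).sum
            + (F.countP (fun p => q == ((p.2 - p.1, p.2) : Int × Int)) : Int)
            + (F.count ((q.2 - q.1, q.2) : Int × Int) : Int)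
            + (if q == ((q.2 - q.1, q.2) : Int × Int) then (1 : Int) else 0) := by
      rw [List.map_append, List.sum_append]
      have h1 : (F.map (fun p => (((F ++ [q]).count ((p.2 - p.1, p.2) : Int × Int) : Nat) : Int))).sum
          = (F.map (fun p => ((F.count ((p.2 - p.1, p.2) : Int × Int) : Nat) : Int)
              + (if q == ((p.2 - p.1, p.2) : Int × Int) then (1 : Int) else 0))).sum := by
        congr 1
        apply List.map_congr_left
        intro p _
        rw [hcount, List.count_singleton]
        split_ifs <;> push_cast <;> ring
      rw [h1, PySem.List.sum_map_add_int, PySem.List.sum_map_ite_one_zero]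
      have h2 : ([q].map (fun p => (((F ++ [q]).count ((p.2 - p.1, p.2) : Int × Int) : Nat) : Int))).sum
          = (F.count ((q.2 - q.1, q.2) : Int × Int) : Int)
            + (if q == ((q.2 - q.1, q.2) : Int × Int) then (1 : Int) else 0) := by
        simp only [List.map_cons, List.map_nil, List.sum_cons, List.sum_nil, add_zero]
        rw [hcount, List.count_singleton]
        split_ifs <;> push_cast <;> ring
      rw [h2]; ring
    have hcntP : F.countP (fun p => q == ((p.2 - p.1, p.2) : Int × Int))
        = F.count ((q.2 - q.1, q.2) : Int × Int) := by
      rw [List.count_eq_countP]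
      apply List.countP_congr
      intro x _
      simp only [beq_iff_eq]
      exact cq_eq_comm q x
    have hfil : ((F ++ [q]).filter (fun p => ((p.2 - p.1, p.2) : Int × Int) == p)).length
        = (F.filter (fun p => ((p.2 - p.1, p.2) : Int × Int) == p)).length
          + (if ((q.2 - q.1, q.2) : Int × Int) == q then 1 else 0) := by
      rw [List.filter_append, List.length_append]
      congr 1
      simp only [List.filter_cons, List.filter_nil]
      split_ifs <;> rfl
    rw [hmapsum, hcntP, hfil]
    have hsymm : (q == ((q.2 - q.1, q.2) : Int × Int)) = (((q.2 - q.1, q.2) : Int × Int) == q) := by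
      exact Bool.beq_comm
    rw [hsymm]
    split_ifs with h <;> push_cast <;> linarith [ihs]

-- ===== VERDICT (by name: the statement is the Claim_ definition above) =====
theorem solution_spec : Claim_equal_solution := by
  intro X Y _ hpre
  obtain ⟨hlen, -⟩ := hpre
  have hF : ((X.zip Y).map reduceFrac).length = X.length := by
    simp [List.length_zip]; omega
  obtain ⟨h1, h2, h3⟩ := red_loop X Y hlen X.length (le_refl _)
  set XY := (PySem.List.pyRange 0 (X.length : Int) 1).foldl redStep (X, Y) with hXY
  have hx : ∀ j : Nat, j < ((X.zip Y).map reduceFrac).length →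
      XY.1[j]? = (((X.zip Y).map reduceFrac)[j]?).map Prod.fst := by
    intro j hj; rw [(h3 j).1, if_pos (by omega)]
  have hy : ∀ j : Nat, j < ((X.zip Y).map reduceFrac).length →
      XY.2[j]? = (((X.zip Y).map reduceFrac)[j]?).map Prod.snd := by
    intro j hj; rw [(h3 j).2, if_pos (by omega)]
  have hloop := cnt_loop XY.1 XY.2 _ hx hy X.length (by omega) (0, PySem.Dict.empty)
  have htake : List.take X.length ((X.zip Y).map reduceFrac) = (X.zip Y).map reduceFrac := by
    rw [← hF]; exact List.take_length
  rw [htake] at hloop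
  obtain ⟨-, hkey⟩ := key_lemma ((X.zip Y).map reduceFrac)
  have hcnt : ((X.zip Y).map reduceFrac).map
      (fun q => (((X.zip Y).map reduceFrac).foldl (fun d f => d.insert f (d.getD f 0 + 1))
        (PySem.Dict.empty : PySem.Dict (Int × Int) Int)).getD (q.2 - q.1, q.2) 0)
      = ((X.zip Y).map reduceFrac).map
        (fun q => ((((X.zip Y).map reduceFrac).count ((q.2 - q.1, q.2) : Int × Int) : Nat) : Int)) := by
    apply List.map_congr_left
    intro q _
    rw [PySem.Dict.getD_foldl_insert_add_one, PySem.Dict.getD_empty, zero_add]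
  simp only [Spec_solution, solution, solution_alt, ← hXY]
  rw [hloop, hcnt, hkey, PySem.Int.floordiv_eq_ediv_of_pos (by norm_num),
    Int.mul_ediv_cancel_left _ (by norm_num)]
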